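-- pv_equiv track=rewrite | github.com/coderxio/sagerx | airflow/dags/vsac/vsac.py | get_latest_version_cms_eMeasureID
-- ===== SOURCE A (Python) =====
-- def get_latest_version_cms_eMeasureID(values):
--     latest_versions = {}
--     for value in values:
--         measure_id = ''.join(filter(str.isalpha, value))
--         version_number = ''.join(filter(str.isdigit, value))
--         if measure_id not in latest_versions or latest_versions[measure_id] < version_number:
--             latest_versions[measure_id] = version_number
--     return [measure_id + 'v' + version for measure_id, version in latest_versions.items()]
-- ===== SOURCE B (Python) =====
-- def get_latest_version_cms_eMeasureID(values):
--     groups = {}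
--     for value in values:
--         measure_id = ''.join(c for c in value if c.isalpha())
--         version = ''.join(c for c in value if c.isdigit())
--         groups.setdefault(measure_id, []).append(version)
--     return [measure_id + 'v' + max(versions) for measure_id, versions in groups.items()]
-- ===== Notes on version B (the rewrite author's own statement) =====
-- stated objective: alternative
-- what changed: B groups all version strings per measure id into a dict of lists in one pass, then a second pass takes max(versions) per key; A keeps a single running maximum per key while scanning.
import Mathlib
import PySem

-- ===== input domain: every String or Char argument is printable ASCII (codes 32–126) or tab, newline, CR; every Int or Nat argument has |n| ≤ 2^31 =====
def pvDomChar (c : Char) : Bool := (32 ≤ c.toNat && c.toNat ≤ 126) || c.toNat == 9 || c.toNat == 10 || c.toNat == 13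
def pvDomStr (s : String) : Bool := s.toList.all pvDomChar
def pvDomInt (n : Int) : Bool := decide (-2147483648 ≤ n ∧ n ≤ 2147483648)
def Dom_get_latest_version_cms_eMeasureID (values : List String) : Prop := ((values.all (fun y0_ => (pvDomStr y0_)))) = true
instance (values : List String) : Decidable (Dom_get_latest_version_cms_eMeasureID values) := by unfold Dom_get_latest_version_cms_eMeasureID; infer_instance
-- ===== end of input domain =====

-- ===== PORT A =====
-- B builds a dict of version lists per measure id and reduces each with max in a second pass,
-- instead of A's single-pass running maximum (objective: alternative; same cost).
def pvMeasureId (value : String) : String := String.ofList (value.toList.filter PySem.Chars.isalpha)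
def pvVersion (value : String) : String := String.ofList (value.toList.filter PySem.Chars.isdigit)

def pvStepA (d : PySem.Dict String String) (value : String) : PySem.Dict String String :=
  let measure_id := pvMeasureId value
  let version_number := pvVersion value
  if !(d.contains measure_id) || decide (d.getD measure_id "" < version_number) then
    d.insert measure_id version_number
  else d

def get_latest_version_cms_eMeasureID (values : List String) : List String :=
  ((values.foldl pvStepA PySem.Dict.empty).items.map (fun p => p.1 ++ "v" ++ p.2))

-- ===== PORT B =====
def pvStepB (d : PySem.Dict String (List String)) (value : String) : PySem.Dict String (List String) :=
  d.modify (pvMeasureId value) [] (fun vs => vs ++ [pvVersion value])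

def get_latest_version_cms_eMeasureID_alt (values : List String) : List String :=
  ((values.foldl pvStepB PySem.Dict.empty).items.map
    (fun p => p.1 ++ "v" ++ ((PySem.List.max? p.2 (fun x => x)).getD "")))

-- ===== PRECONDITION & SPEC =====
def Spec_get_latest_version_cms_eMeasureID (values : List String) (out : List String) : Prop := out = get_latest_version_cms_eMeasureID_alt values
instance (values : List String) (out : List String) : Decidable (Spec_get_latest_version_cms_eMeasureID values out) := by unfold Spec_get_latest_version_cms_eMeasureID; infer_instance

-- ===== CLAIM (what is proved, stated in full; the proofs are below) =====
def Claim_equal_get_latest_version_cms_eMeasureID : Prop := ∀ (values : List String), Dom_get_latest_version_cms_eMeasureID values → Spec_get_latest_version_cms_eMeasureID values (get_latest_version_cms_eMeasureID values)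

-- ===== LEMMAS AND PROOFS =====
-- Python's max picks the later of two strings, first on ties:
def pvMaxS (a b : String) : String := if a < b then b else a
-- per-list running maximum ("" for the empty list, which never occurs as a dict value)
def pvGval (vs : List String) : String :=
  match vs with
  | [] => ""
  | h :: t => t.foldl pvMaxS h
-- the simulation map from B's dict entries to A's dict entries
def pvGmap (p : String × List String) : String × String := (p.1, pvGval p.2)

lemma pvMaxS_eq (a b : String) : pvMaxS a b = max a b := by
  simp only [pvMaxS, max_def]
  rcases lt_trichotomy a b with h | h | h
  · rw [if_pos h, if_pos h.le]
  · subst h; simp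
  · rw [if_neg (not_lt.mpr h.le), if_neg (not_le.mpr h)]

lemma pvStr_not_lt_empty (s : String) : ¬ s < "" := by
  intro h
  rw [String.lt_iff_toList_lt] at h
  simp at h

lemma pvMaxS_empty_left (x : String) : pvMaxS "" x = x := by
  simp only [pvMaxS]
  split
  · rfl
  · rename_i h
    exact le_antisymm (not_lt.mp (pvStr_not_lt_empty x)) (not_lt.mp h)

lemma pvGval_append (vs : List String) (x : String) :
    pvGval (vs ++ [x]) = pvMaxS (pvGval vs) x := by
  cases vs with
  | nil => simp [pvGval, pvMaxS_empty_left]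
  | cons h t => simp [pvGval, List.foldl_append]

lemma pvMax?_getD_eq_gval (vs : List String) :
    (PySem.List.max? vs (fun x => x)).getD "" = pvGval vs := by
  cases vs with
  | nil => rfl
  | cons h t =>
    rw [PySem.List.max?_id_cons]
    simp only [Option.getD_some, pvGval]
    have : pvMaxS = (max : String → String → String) := funext fun a => funext fun b => pvMaxS_eq a b
    rw [this]

lemma pvKeys_eq {dA : PySem.Dict String String} {dB : PySem.Dict String (List String)}
    (hR : dA.items = dB.items.map pvGmap) : dA.keys = dB.keys := by
  simp only [PySem.Dict.keys, hR, List.map_map]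
  rfl

lemma pvStep_sim (dA : PySem.Dict String String) (dB : PySem.Dict String (List String))
    (hnd : dB.keys.Nodup) (hR : dA.items = dB.items.map pvGmap) (v : String) :
    (pvStepA dA v).items = (pvStepB dB v).items.map pvGmap := by
  have hk : dA.keys = dB.keys := pvKeys_eq hR
  have hc : dA.contains (pvMeasureId v) = dB.contains (pvMeasureId v) := by
    rw [PySem.Dict.contains_eq_decide_mem_keys, PySem.Dict.contains_eq_decide_mem_keys, hk]
  by_cases h : dB.contains (pvMeasureId v) = true
  · -- key already present: A updates the running max, B appends to the list
    obtain ⟨p, hp, hp1⟩ : ∃ p ∈ dB.items, p.1 = pvMeasureId v := by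
      have : pvMeasureId v ∈ dB.keys := (PySem.Dict.contains_iff_mem_keys dB _).mp h
      simpa [PySem.Dict.keys] using this
    obtain ⟨k, vs⟩ := p
    subst hp1
    have hgB : dB.getD (pvMeasureId v) [] = vs := PySem.Dict.getD_of_mem_items dB hp hnd []
    have hndA : dA.keys.Nodup := by rw [hk]; exact hnd
    have hmemA : (pvMeasureId v, pvGval vs) ∈ dA.items := by
      rw [hR]; exact List.mem_map.mpr ⟨(pvMeasureId v, vs), hp, rfl⟩
    have hgA : dA.getD (pvMeasureId v) "" = pvGval vs :=
      PySem.Dict.getD_of_mem_items dA hmemA hndA ""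
    have hcB' : (dB.modify (pvMeasureId v) [] (fun l => l ++ [pvVersion v])).items
        = dB.items.map (fun p => if (p.1 == pvMeasureId v) = true then (pvMeasureId v, vs ++ [pvVersion v]) else p) := by
      simp only [PySem.Dict.modify, hgB]
      exact PySem.Dict.items_insert_of_contains dB _ h
    have hvs_uniq : ∀ q ∈ dB.items, q.1 = pvMeasureId v → q.2 = vs := by
      intro q hq hq1
      have h1 : dB.get? (pvMeasureId v) = some q.2 := by
        have := PySem.Dict.get?_of_mem_items (d := dB) (k := q.1) (v := q.2) (by simpa using hq) hnd
        rwa [hq1] at this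
      have h2 : dB.get? (pvMeasureId v) = some vs :=
        PySem.Dict.get?_of_mem_items (d := dB) hp hnd
      rw [h1] at h2; exact (Option.some.injEq _ _).mp h2
    simp only [pvStepA, pvStepB, hc, h, hgA, hcB', Bool.not_true, Bool.false_or]
    by_cases hlt : pvGval vs < pvVersion v
    · rw [if_pos (by simpa using hlt)]
      rw [PySem.Dict.items_insert_of_contains dA _ (hc.trans h)]
      rw [hR, List.map_map, List.map_map]
      apply List.map_congr_left
      intro q hq
      by_cases hq1 : q.1 = pvMeasureId v
      · have hq2 : q.2 = vs := hvs_uniq q hq hq1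
        simp [Function.comp, pvGmap, hq1, hq2, pvGval_append, pvMaxS, hlt]
      · simp [Function.comp, pvGmap, hq1]
    · rw [if_neg (by simpa using hlt)]
      rw [hR, List.map_map]
      symm
      apply List.map_congr_left
      intro q hq
      by_cases hq1 : q.1 = pvMeasureId v
      · have hq2 : q.2 = vs := hvs_uniq q hq hq1
        have : pvGval (vs ++ [pvVersion v]) = pvGval vs := by
          rw [pvGval_append]; simp only [pvMaxS]; rw [if_neg hlt]
        simp [Function.comp, pvGmap, hq1, hq2, this]
      · simp [Function.comp, pvGmap, hq1]
  · -- new key: both append a fresh entry at the end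
    have h' : dB.contains (pvMeasureId v) = false := by simpa using h
    have hgB : dB.getD (pvMeasureId v) [] = [] := PySem.Dict.getD_of_not_contains dB [] h'
    simp only [pvStepA, pvStepB, hc, h', Bool.not_false, Bool.true_or, if_pos,
      PySem.Dict.modify, hgB, List.nil_append]
    rw [PySem.Dict.items_insert_of_not_contains dA _ (hc.trans h'),
      PySem.Dict.items_insert_of_not_contains dB _ h']
    simp [hR, pvGmap, pvGval]

lemma pvStepB_nodup (dB : PySem.Dict String (List String)) (hnd : dB.keys.Nodup) (v : String) :
    (pvStepB dB v).keys.Nodup := by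
  have := PySem.Dict.nodup_keys_foldl_modify_key [v] (fun w => pvMeasureId w) []
    (fun _ w l => l ++ [pvVersion w]) dB hnd
  simpa [pvStepB] using this

lemma pvLoop_sim (l : List String) :
    ∀ (dA : PySem.Dict String String) (dB : PySem.Dict String (List String)),
      dB.keys.Nodup → dA.items = dB.items.map pvGmap →
      (l.foldl pvStepA dA).items = (l.foldl pvStepB dB).items.map pvGmap := by
  induction l with
  | nil => intro dA dB _ hR; simpa using hR
  | cons v t ih =>
    intro dA dB hnd hR
    simp only [List.foldl_cons]
    exact ih _ _ (pvStepB_nodup dB hnd v) (pvStep_sim dA dB hnd hR v)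

-- ===== VERDICT (by name: the statement is the Claim_ definition above) =====
theorem get_latest_version_cms_eMeasureID_spec : Claim_equal_get_latest_version_cms_eMeasureID := by
  intro values _
  unfold Spec_get_latest_version_cms_eMeasureID
  unfold get_latest_version_cms_eMeasureID get_latest_version_cms_eMeasureID_alt
  rw [pvLoop_sim values PySem.Dict.empty PySem.Dict.empty
      PySem.Dict.nodup_keys_empty (by rfl)]
  rw [List.map_map]
  apply List.map_congr_left
  intro p _
  simp [Function.comp, pvGmap, pvMax?_getD_eq_gval]
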